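-- pv_equiv track=rewrite | github.com/kmodexc/TrackUnitPython | tests/test_sqlcache.py | dict_equal
-- ===== SOURCE A (Python) =====
-- def dict_equal(x,y):
--     for k in x:
--         if not x[k] == "none" and k in y:
--             if not x[k] == y[k]:
--                 return False
--     for k in y:
--         if not y[k] == "none" and k in x:
--             if not x[k] == y[k]:
--                 return False
--     return True
-- ===== SOURCE B (Python) =====
-- def dict_equal(x, y):
--     common = x.keys() & y.keys()
--     return all(x[k] == y[k] for k in common)
-- ===== Notes on version B (the rewrite author's own statement) =====
-- stated objective: simpler
-- what changed: Replaces A's two symmetric guarded passes (with dead 'none' guards: a mismatch always has a non-'none' side) by a single pass: intersect the key sets once and require equality on every common key.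
import Mathlib
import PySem

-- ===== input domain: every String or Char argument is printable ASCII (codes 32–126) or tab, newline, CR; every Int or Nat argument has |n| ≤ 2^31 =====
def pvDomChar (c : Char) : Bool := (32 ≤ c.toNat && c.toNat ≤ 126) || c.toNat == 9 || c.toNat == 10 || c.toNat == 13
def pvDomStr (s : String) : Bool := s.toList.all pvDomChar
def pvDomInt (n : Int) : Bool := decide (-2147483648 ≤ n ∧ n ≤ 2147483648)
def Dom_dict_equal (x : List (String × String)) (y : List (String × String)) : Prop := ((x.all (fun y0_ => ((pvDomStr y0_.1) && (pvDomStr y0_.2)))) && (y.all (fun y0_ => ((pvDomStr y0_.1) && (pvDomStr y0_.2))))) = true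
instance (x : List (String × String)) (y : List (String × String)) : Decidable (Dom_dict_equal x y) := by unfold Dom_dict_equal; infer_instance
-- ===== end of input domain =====

-- B replaces A's two symmetric guarded passes by one intersection-then-compare pass (simpler; same cost).

-- ===== PORT A =====
-- for k in x: if not x[k] == "none" and k in y: if not x[k] == y[k]: return False   (twice, symmetrically)
def dict_equal (x : List (String × String)) (y : List (String × String)) : Bool :=
  let dx := PySem.Dict.ofList x
  let dy := PySem.Dict.ofList y
  (dx.keys.all (fun k =>
      if (!(dx.getD k "" == "none")) && dy.contains k then
        dx.getD k "" == dy.getD k ""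
      else true)) &&
  (dy.keys.all (fun k =>
      if (!(dy.getD k "" == "none")) && dx.contains k then
        dx.getD k "" == dy.getD k ""
      else true))

-- ===== PORT B =====
-- common = x.keys() & y.keys(); return all(x[k] == y[k] for k in common)
def dict_equal_alt (x : List (String × String)) (y : List (String × String)) : Bool :=
  let dx := PySem.Dict.ofList x
  let dy := PySem.Dict.ofList y
  let common := dx.keys.filter (fun k => dy.contains k)
  common.all (fun k => dx.getD k "" == dy.getD k "")

-- ===== PRECONDITION & SPEC =====
def Spec_dict_equal (x : List (String × String)) (y : List (String × String)) (out : Bool) : Prop := out = dict_equal_alt x y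
instance (x : List (String × String)) (y : List (String × String)) (out : Bool) : Decidable (Spec_dict_equal x y out) := by unfold Spec_dict_equal; infer_instance

-- ===== CLAIM (what is proved, stated in full; the proofs are below) =====
def Claim_equal_dict_equal : Prop := ∀ (x : List (String × String)) (y : List (String × String)), Dom_dict_equal x y → Spec_dict_equal x y (dict_equal x y)

-- ===== LEMMAS AND PROOFS =====

theorem dict_equal_eq_alt (x y : List (String × String)) :
    dict_equal x y = dict_equal_alt x y := by
  simp only [dict_equal, dict_equal_alt]
  set dx := PySem.Dict.ofList x with hdx
  set dy := PySem.Dict.ofList y with hdy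
  rw [Bool.eq_iff_iff]
  simp only [Bool.and_eq_true, List.all_eq_true, List.mem_filter]
  constructor
  · rintro ⟨h1, h2⟩ k ⟨hk, hky⟩
    by_cases hnone : dx.getD k "" = "none"
    · -- x[k] = "none": second loop fires unless y[k] = "none" too
      by_cases hnone' : dy.getD k "" = "none"
      · simp [hnone, hnone']
      · have hkY : k ∈ dy.keys := (PySem.Dict.contains_iff_mem_keys _ _).mp hky
        have hkx : dy.contains k → dx.contains k := fun _ =>
          (PySem.Dict.contains_iff_mem_keys _ _).mpr hk
        have := h2 k hkY
        simpa [hnone', hkx hky] using this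
    · have := h1 k hk
      simpa [hnone, hky] using this
  · intro h
    have hx : ∀ k, dy.contains k = true → k ∈ dx.keys → dx.getD k "" = dy.getD k "" := by
      intro k hky hk
      simpa using h k ⟨hk, hky⟩
    refine ⟨fun k hk => ?_, fun k hk => ?_⟩
    · by_cases hky : dy.contains k = true
      · simp [hx k hky hk]
      · simp [hky]
    · by_cases hkx : dx.contains k = true
      · have hkX : k ∈ dx.keys := (PySem.Dict.contains_iff_mem_keys _ _).mp hkx
        have hky : dy.contains k = true := (PySem.Dict.contains_iff_mem_keys _ _).mpr hk
        simp [hx k hky hkX]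
      · simp [hkx]

-- ===== VERDICT (by name: the statement is the Claim_ definition above) =====
theorem dict_equal_spec : Claim_equal_dict_equal := by
  intro x y _
  exact dict_equal_eq_alt x y
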